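-- pv_equiv track=rewrite | github.com/davweb/advent-of-code | advent/year2023/day19.py | part1
-- ===== SOURCE A (Python) =====
-- from operator import lt, gt
--
-- def part1(data):
--     """
--     >>> part1(read_input())
--     406934
--     """
--
--     workflows, parts = data
--     total = 0
--
--     for part in parts:
--         workflow = list(workflows['in'])
--
--         while True:
--             step = workflow.pop(0)
--
--             if step == 'A':
--                 total += sum(part)
--                 break
--
--             if step == 'R':
--                 break
--
--             if ':' not in step:
--                 workflow = list(workflows[step])
--                 continue
--
--             instruction, destination = step.split(':')
--
--             variable = part['xmas'.index(instruction[0])]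
--             operator = lt if instruction[1] == '<' else gt
--             value = int(instruction[2:])
--
--             if operator(variable, value):
--                 workflow = [destination]
--
--     return total
-- ===== SOURCE B (Python) =====
-- def part1(data):
--     workflows, parts = data
--
--     def evaluate(name, part):
--         if name == 'A':
--             return sum(part)
--         if name == 'R':
--             return 0
--         for step in workflows[name]:
--             if ':' not in step:
--                 return evaluate(step, part)
--             instruction, destination = step.split(':')
--             variable = part['xmas'.index(instruction[0])]
--             value = int(instruction[2:])
--             if variable < value if instruction[1] == '<' else variable > value:
--                 return evaluate(destination, part)
--
--     return sum(evaluate('in', part) for part in parts)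
-- ===== Notes on version B (the rewrite author's own statement) =====
-- stated objective: simpler
-- what changed: Replaces A's mutable step-list state machine (pop(0), list-splicing the current workflow, singleton [destination] re-entry) with a direct recursive evaluator over workflow names that bottoms out at 'A'/'R' and sums per part.
-- outside the precondition, e.g. on part1(({'in': ['x<5:A', 'b'], 'b': ['in']}, [[1, 2, 3, 4]])): A returns 10, B returns 10; on part1(({'in': ['x<5:A', 'q<3:R']}, [[1, 2, 3, 4]])): A returns 10, B returns 10
import Mathlib
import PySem

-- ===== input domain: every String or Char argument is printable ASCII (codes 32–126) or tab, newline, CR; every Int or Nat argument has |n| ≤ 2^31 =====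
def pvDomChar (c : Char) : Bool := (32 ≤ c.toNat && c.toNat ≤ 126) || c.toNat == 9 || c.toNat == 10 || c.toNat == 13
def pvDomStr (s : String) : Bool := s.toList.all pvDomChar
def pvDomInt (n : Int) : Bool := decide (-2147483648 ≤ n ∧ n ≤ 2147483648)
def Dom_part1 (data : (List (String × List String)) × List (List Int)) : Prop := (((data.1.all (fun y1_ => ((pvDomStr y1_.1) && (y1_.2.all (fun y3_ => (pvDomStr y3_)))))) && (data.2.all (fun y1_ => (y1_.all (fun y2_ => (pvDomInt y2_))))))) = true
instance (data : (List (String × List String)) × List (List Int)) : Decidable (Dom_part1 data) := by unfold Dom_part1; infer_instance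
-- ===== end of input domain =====

-- B replaces A's mutable step-list state machine (pop(0), list splicing, [destination]
-- re-entry) with a direct recursive evaluator over workflow names (objective: simpler).

-- Evaluation of one conditional step "<var><op><value>:<destination>" on a part: the parsing
-- lines are IDENTICAL in Source A and Source B, so both ports share this helper; `none` is exactly
-- where the Python raises (bad split arity, missing chars, 'xmas'.index miss, short part,
-- unparsable int).
def condVal (part : List Int) (instruction : String) : Option Bool :=
  match PySem.Str.pyGet? instruction 0 with
  | none => none
  | some c0 =>
    -- 'xmas'.index(instruction[0]); find = -1 is Python's ValueError
    let i := PySem.Chars.find ['x', 'm', 'a', 's'] [c0]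
    if i = -1 then none
    else
      match PySem.List.pyGet? part i with
      | none => none
      | some varv =>
        match PySem.Str.pyGet? instruction 1 with
        | none => none
        | some c1 =>
          match PySem.Int.ofStr? (PySem.Str.slice instruction (some 2) none) with
          | none => none
          | some value => some (if c1 = '<' then decide (varv < value) else decide (varv > value))

def stepCond (part : List Int) (step : String) : Option (String × Bool) :=
  match PySem.Str.split? step ":" with
  | some [instruction, destination] =>
    (condVal part instruction).map (fun fires => (destination, fires))
  | _ => none

-- The two lemmas below are cited by port A's termination proof, so they stay above it.
-- A piece produced by splitting on a single character never contains that character.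
theorem splitOn_go_no_sep (c : Char) :
    ∀ (fuel : Nat) (l cur : List Char) (acc : List (List Char)),
      l.length < fuel → c ∉ cur → (∀ p ∈ acc, c ∉ p) →
      ∀ p ∈ PySem.Chars.splitOn.go [c] fuel l cur acc, c ∉ p := by
  intro fuel
  induction fuel with
  | zero => intro l cur acc h; omega
  | succ f ih =>
    intro l cur acc hlen hcur hacc p hp
    match l with
    | [] =>
      rw [PySem.Chars.splitOn.go] at hp
      · simp only [List.mem_reverse, List.mem_cons] at hp
        rcases hp with h | h
        · subst h; simpa using hcur
        · exact hacc p h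
      · omega
    | ch :: rest =>
      rw [PySem.Chars.splitOn.go] at hp
      by_cases hpre : [c].isPrefixOf (ch :: rest) = true
      · rw [if_pos hpre] at hp
        refine ih _ _ _ (by simp at hlen ⊢; omega) (by simp) ?_ p hp
        intro q hq
        rcases List.mem_cons.mp hq with h | h
        · subst h; simpa using hcur
        · exact hacc q h
      · rw [if_neg hpre] at hp
        have hch : ch ≠ c := fun h => hpre (by simp [h, List.isPrefixOf])
        refine ih _ _ _ (by simpa using hlen) ?_ hacc p hp
        intro h
        rcases List.mem_cons.mp h with h | h
        · exact hch h.symm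
        · exact hcur h

theorem split_no_colon {s : String} {l : List String} (h : PySem.Str.split? s ":" = some l)
    {d : String} (hd : d ∈ l) : PySem.Str.isIn ":" d = false := by
  unfold PySem.Str.split? PySem.Chars.split? at h
  rw [if_neg (by simp)] at h
  simp only [Option.map_some, Option.some.injEq] at h
  subst h
  rw [List.mem_map] at hd
  obtain ⟨dc, hdc, rfl⟩ := hd
  have hsep : (":".toList) = [':'] := rfl
  rw [hsep] at hdc
  have hno : ':' ∉ dc := by
    have hgo : dc ∈ PySem.Chars.splitOn.go [':'] (s.toList.length + 1) s.toList [] [] := by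
      simpa [PySem.Chars.splitOn] using hdc
    exact splitOn_go_no_sep ':' (s.toList.length + 1) s.toList [] [] (by omega) (by simp)
      (by simp) dc hgo
  rw [PySem.Str.isIn_eq, PySem.Chars.isIn_eq_false_iff]
  intro hinf
  exact hno (by simpa using hinf.mem (show ':' ∈ (":".toList) by simp [hsep]))

-- A destination produced by stepCond contains no ':' (it came out of step.split(':')).
theorem stepCond_no_colon {part : List Int} {step d : String} {b : Bool}
    (h : stepCond part step = some (d, b)) : PySem.Str.isIn ":" d = false := by
  unfold stepCond at h
  split at h
  next instruction destination heq =>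
    rw [Option.map_eq_some_iff] at h
    obtain ⟨fires, -, h2⟩ := h
    have hd : destination = d := congrArg Prod.fst h2
    exact split_no_colon heq (by simp [← hd])
  next => exact absurd h (by simp)

-- weight of a pending step list: conditional steps count 2 (they may splice in one
-- colon-free [destination] without consuming a lookup), others 1.
def stepWeight (s : String) : Nat := if PySem.Str.isIn ":" s then 2 else 1

-- ===== PORT A =====
-- A's while-loop over the mutable `workflow` list; the fuel only guards the workflow
-- lookups (`workflow = list(workflows[step])`); `none` is exactly where the Python raises
-- (pop(0) from an empty list, KeyError, a bad conditional step) or exceeds the fuel — on a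
-- terminating run each looked-up name is distinct, so the fuel part1 supplies is never the
-- cause of a `none` there.
def stepLoopA (ws : List (String × List String)) (part : List Int) :
    Nat → List String → Option Int
  | _, [] => none                                      -- workflow.pop(0) on empty: IndexError
  | fuel, step :: workflow =>
    if step = "A" then some part.sum
    else if step = "R" then some 0
    else if hcol : PySem.Str.isIn ":" step = false then
      match fuel with
      | 0 => none
      | f + 1 =>
        match (PySem.Dict.mk ws).get? step with
        | none => none                                 -- KeyError
        | some steps => stepLoopA ws part f steps
    else
      match h : stepCond part step with
      | none => none
      | some (destination, fires) =>
        if fires then stepLoopA ws part fuel [destination]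
        else stepLoopA ws part fuel workflow
termination_by fuel steps => (fuel, (steps.map stepWeight).sum)
decreasing_by
  · exact Prod.Lex.left _ _ (by omega)
  · refine Prod.Lex.right _ ?_
    have hw : stepWeight destination = 1 := by
      unfold stepWeight; rw [stepCond_no_colon h]; simp
    have hs : stepWeight step = 2 := by
      unfold stepWeight
      rw [if_pos (by revert hcol; cases PySem.Str.isIn ":" step <;> simp)]
    simp only [List.map_cons, List.map_nil, List.sum_cons, List.sum_nil, hw, hs]
    omega
  · refine Prod.Lex.right _ ?_
    have : 1 ≤ stepWeight step := by unfold stepWeight; split <;> omega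
    simp only [List.map_cons, List.sum_cons]
    omega

def part1 (data : (List (String × List String)) × List (List Int)) : Int :=
  data.2.foldl
    (fun total part =>
      total +
        (match (PySem.Dict.mk data.1).get? "in" with
         | none => (0 : Int)                           -- KeyError (outside Pre_)
         | some workflow =>
           (stepLoopA data.1 part (data.1.length + 1) workflow).getD 0)) 0

-- ===== PORT B =====
-- B's recursive evaluate(name, part); the fuel guards each workflow lookup exactly as in
-- port A (one extra unit for the top-level lookup of 'in' that A performs outside its loop).
mutual
def evalB (ws : List (String × List String)) (part : List Int) :
    Nat → String → Option Int
  | fuel, name =>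
    if name = "A" then some part.sum
    else if name = "R" then some 0
    else
      match fuel with
      | 0 => none
      | f + 1 =>
        match (PySem.Dict.mk ws).get? name with
        | none => none                                 -- KeyError
        | some rules => goB ws part f rules
termination_by fuel _ => (fuel, 0)

def goB (ws : List (String × List String)) (part : List Int) :
    Nat → List String → Option Int
  | _, [] => none                                      -- for-loop fell through: TypeError on None
  | fuel, step :: rest =>
    if PySem.Str.isIn ":" step = false then evalB ws part fuel step
    else
      match stepCond part step with
      | none => none
      | some (destination, fires) =>
        if fires then evalB ws part fuel destination else goB ws part fuel rest
termination_by fuel rules => (fuel, rules.length + 1)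
end

def part1_alt (data : (List (String × List String)) × List (List Int)) : Int :=
  data.2.foldl (fun total part => total + (evalB data.1 part (data.1.length + 2) "in").getD 0) 0

-- ===== PRECONDITION & SPEC =====
def keysOf (ws : List (String × List String)) : List String := ws.map Prod.fst

-- parse "<var><op><value>:<destination>" → (destination, rating index, op char, value)
def preParse (s : String) : Option (String × Int × Char × Int) :=
  match PySem.Str.split? s ":" with
  | some [instruction, d] =>
    match PySem.Str.pyGet? instruction 0, PySem.Str.pyGet? instruction 1,
          PySem.Int.ofStr? (PySem.Str.slice instruction (some 2) none) with
    | some c0, some c1, some v =>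
      let i := PySem.Chars.find ['x', 'm', 'a', 's'] [c0]
      if i = -1 then none else some (d, i, c1, v)
    | _, _, _ => none
  | _ => none

-- static successor names of a rules list (terminals A/R dropped)
def ruleSuccs (steps : List String) : List String :=
  steps.filterMap (fun s =>
    if PySem.Str.isIn ":" s then
      match preParse s with
      | some (d, _, _, _) => if d = "A" ∨ d = "R" then none else some d
      | none => none
    else if s = "A" ∨ s = "R" then none else some s)

def succsOf (ws : List (String × List String)) (n : String) : List String :=
  match (PySem.Dict.mk ws).get? n with
  | none => []
  | some steps => ruleSuccs steps

-- names statically reachable from 'in' (bounded closure; ws.length + 1 rounds saturate)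
def reachStep (ws : List (String × List String)) (cur : List String) : List String :=
  cur.foldl (fun acc n => (succsOf ws n).foldl
    (fun a m => if m ∈ a then a else a ++ [m]) acc) cur

def reachable (ws : List (String × List String)) : List String :=
  (reachStep ws)^[ws.length + 1] ["in"]

-- Kahn-style pruning: repeatedly drop names with no remaining successor; the reachable
-- graph is acyclic iff everything is eventually dropped.
def pruneOnce (ws : List (String × List String)) (rem : List String) : List String :=
  rem.filter (fun n => (succsOf ws n).any (fun m => rem.contains m))

def acyclicReach (ws : List (String × List String)) : Bool :=
  ((pruneOnce ws)^[ws.length + 2] (reachable ws)).isEmpty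

def preFires (part : List Int) (s : String) : Bool :=
  match preParse s with
  | some (_, i, c1, v) =>
    match PySem.List.pyGet? part i with
    | some x => if c1 = '<' then decide (x < v) else decide (x > v)
    | none => false
  | none => false

def preStepOk (keys : List String) (parts : List (List Int)) (s : String) : Bool :=
  s == "A" || s == "R" ||
  (if PySem.Str.isIn ":" s then
     match preParse s with
     | some (d, i, _, _) =>
       parts.all (fun part => decide (i < (part.length : Int))) &&
       (d == "A" || d == "R" || keys.contains d)
     | none => false
   else keys.contains s)

def preEntryOk (keys : List String) (parts : List (List Int)) (steps : List String) : Bool :=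
  !steps.isEmpty &&
  steps.all (preStepOk keys parts) &&
  (match steps.getLast? with
   | none => false
   | some s => !(PySem.Str.isIn ":" s) || parts.all (fun part => preFires part s))

def preReachOk (ws : List (String × List String)) (parts : List (List Int)) : Bool :=
  (reachable ws).all (fun n =>
    match (PySem.Dict.mk ws).get? n with
    | some steps => preEntryOk (keysOf ws) parts steps
    | none => false)

-- Pre_part1 admits parts = [] outright and otherwise the well-formed inputs of this puzzle:
-- every workflow statically reachable from 'in' exists, is nonempty, has every step
-- parsable with its rating index in range of every part and its destination a workflow
-- name or A/R, ends in a step that is unconditional or fires for every part, and the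
-- reachable rule graph is acyclic.  This excludes exactly the inputs where A raises
-- (KeyError/IndexError/ValueError/TypeError) or loops forever, plus — a stated static
-- over-approximation, since whether A returns depends on the part values — inputs whose
-- malformed step, out-of-range index or graph cycle is avoided by the data at run time
-- (there A and B's Python return the same value; see the cites).
def Pre_part1 (data : (List (String × List String)) × List (List Int)) : Prop :=
  data.2 = [] ∨ (preReachOk data.1 data.2 = true ∧ acyclicReach data.1 = true)

instance (data : (List (String × List String)) × List (List Int)) : Decidable (Pre_part1 data) := by
  unfold Pre_part1; infer_instance

def pvWitness_part1 : ((List (String × List String)) × List (List Int)) :=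
  ([("in", ["x<5:two", "R"]), ("two", ["m>1:A", "R"])], [[1, 2, 3, 4], [10, 0, 0, 0]])

def Spec_part1 (data : (List (String × List String)) × List (List Int)) (out : Int) : Prop :=
  out = part1_alt data
instance (data : (List (String × List String)) × List (List Int)) (out : Int) :
    Decidable (Spec_part1 data out) := by unfold Spec_part1; infer_instance

-- ===== CLAIM (what is proved, stated in full; the proofs are below) =====
def Claim_equal_part1 : Prop :=
  ∀ (data : (List (String × List String)) × List (List Int)),
    Dom_part1 data → Pre_part1 data → Spec_part1 data (part1 data)

-- ===== LEMMAS AND PROOFS =====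

-- every step weighs at least 1
theorem one_le_stepWeight (s : String) : 1 ≤ stepWeight s := by
  unfold stepWeight; split <;> omega

-- The two state machines are in lock step for EVERY fuel and pending step list: both
-- consume one unit of fuel per workflow lookup and nothing else.
theorem loop_eq (ws : List (String × List String)) (part : List Int) :
    ∀ (fuel w : Nat) (steps : List String), (steps.map stepWeight).sum ≤ w →
      stepLoopA ws part fuel steps = goB ws part fuel steps := by
  intro fuel
  induction fuel using Nat.strong_induction_on with
  | _ fuel ihf =>
  intro w
  induction w with
  | zero =>
    intro steps hw
    match steps with
    | [] => rw [stepLoopA.eq_def, goB.eq_def]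
    | s :: rest =>
      exfalso
      have := one_le_stepWeight s
      simp only [List.map_cons, List.sum_cons] at hw
      omega
  | succ w ihw =>
    intro steps hw
    match steps with
    | [] => rw [stepLoopA.eq_def, goB.eq_def]
    | step :: rest =>
      by_cases hA : step = "A"
      · subst hA
        rw [stepLoopA.eq_def, goB.eq_def]
        simp [show PySem.Chars.isIn [':'] ['A'] = false from by decide]
        rw [evalB.eq_def]
        simp
      by_cases hR : step = "R"
      · subst hR
        rw [stepLoopA.eq_def, goB.eq_def]
        simp [show PySem.Chars.isIn [':'] ['R'] = false from by decide]
        rw [evalB.eq_def]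
        simp
      by_cases hcol : PySem.Str.isIn ":" step = false
      · -- jump to workflows[step]
        rw [stepLoopA.eq_def, goB.eq_def]
        simp only [if_neg hA, if_neg hR, dif_pos hcol, if_pos hcol]
        rw [evalB.eq_def]
        simp only [if_neg hA, if_neg hR]
        cases fuel with
        | zero => rfl
        | succ f =>
          rcases hget : (PySem.Dict.mk ws).get? step with _ | s'
          · rfl
          · exact ihf f (by omega) ((s'.map stepWeight).sum) s' le_rfl
      · -- conditional step
        have hw2 : stepWeight step = 2 := by
          unfold stepWeight
          rw [if_pos (by revert hcol; cases PySem.Str.isIn ":" step <;> simp)]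
        simp only [List.map_cons, List.sum_cons, hw2] at hw
        rw [stepLoopA.eq_def, goB.eq_def]
        simp only [if_neg hA, if_neg hR, dif_neg hcol, if_neg hcol]
        rcases hsc : stepCond part step with _ | ⟨destination, fires⟩
        · rfl
        · have hd := stepCond_no_colon hsc
          rcases fires with _ | _
          · -- does not fire: scan on
            show stepLoopA ws part fuel rest = goB ws part fuel rest
            refine ihw rest ?_
            have := one_le_stepWeight step
            omega
          · -- fires: A splices [destination], B recurses into it
            show stepLoopA ws part fuel [destination] = evalB ws part fuel destination
            have h1 : stepLoopA ws part fuel [destination] = goB ws part fuel [destination] := by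
              refine ihw [destination] ?_
              have hw1 : stepWeight destination = 1 := by
                unfold stepWeight; rw [hd]; simp
              simp only [List.map_cons, List.map_nil, List.sum_cons, List.sum_nil, hw1]
              omega
            rw [h1, goB.eq_def]
            simp [show PySem.Chars.isIn [':'] destination.toList = false from by simpa using hd]

-- ===== VERDICT (by name: the statement is the Claim_ definition above) =====
theorem part1_spec : Claim_equal_part1 := by
  intro data _hdom _hpre
  obtain ⟨ws, parts⟩ := data
  unfold Spec_part1 part1 part1_alt
  apply PySem.List.foldl_congr_mem
  intro acc part _hp
  rw [evalB.eq_def]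
  simp only [String.reduceEq, if_false]
  rcases hget : (PySem.Dict.mk ws).get? "in" with _ | rules
  · rfl
  · show acc + (stepLoopA ws part (ws.length + 1) rules).getD 0 =
        acc + (goB ws part (ws.length + 1) rules).getD 0
    rw [loop_eq ws part (ws.length + 1) ((rules.map stepWeight).sum) rules le_rfl]
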